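-- pv_equiv track=rewrite | github.com/samyuh/feup-fpro | Exercises/RE06 - Strings/rm_letter_rev.py | rm_letter_rev
-- ===== SOURCE A (Python) =====
-- def rm_letter_rev(l, astr):
--         contador = 0
--         frase = ""
--         while contador < len(astr):
--             if astr[contador] != l:
--                 frase = astr[contador] + frase
--             contador += 1
--         return frase
-- ===== SOURCE B (Python) =====
-- def rm_letter_rev(l, astr):
--     out = []
--     i = len(astr) - 1
--     while i >= 0:
--         if astr[i] != l:
--             out.append(astr[i])
--         i -= 1
--     return ''.join(out)
-- ===== Notes on version B (the rewrite author's own statement) =====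
-- stated objective: faster
-- what changed: A scans forward and PREPENDS each kept character to a growing string (quadratic copying; the reversal arises from the prepends); B walks the string with a descending index from the last position and APPENDS kept characters to a list, joining once at the end.
import Mathlib
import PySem

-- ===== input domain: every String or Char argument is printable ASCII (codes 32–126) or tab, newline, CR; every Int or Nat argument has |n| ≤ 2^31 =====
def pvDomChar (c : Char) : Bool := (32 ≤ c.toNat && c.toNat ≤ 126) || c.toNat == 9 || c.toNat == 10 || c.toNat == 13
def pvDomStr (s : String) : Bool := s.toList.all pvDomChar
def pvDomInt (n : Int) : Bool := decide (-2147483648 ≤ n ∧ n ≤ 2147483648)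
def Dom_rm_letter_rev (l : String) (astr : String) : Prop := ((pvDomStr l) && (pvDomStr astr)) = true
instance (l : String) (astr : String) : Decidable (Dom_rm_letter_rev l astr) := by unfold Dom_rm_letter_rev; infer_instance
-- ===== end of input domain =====

-- B replaces A's forward scan with string prepending by a descending-index walk that appends kept characters to a list and joins once (objective: alternative decomposition).

-- ===== PORT A =====
-- while contador < len(astr): if astr[contador] != l: frase = astr[contador] + frase
def rm_letter_rev (l : String) (astr : String) : String :=
  String.ofList (astr.toList.foldl
    (fun frase c => if String.ofList [c] ≠ l then c :: frase else frase) [])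

-- ===== PORT B =====
-- i runs len(astr)-1, …, 0; fuel n encodes i = n-1; astr[i] is in range, so getD is exact
def rm_letter_rev_altLoop (l : String) (cs : List Char) : Nat → List Char → List Char
  | 0, out => out
  | Nat.succ n, out =>
      rm_letter_rev_altLoop l cs n
        (if String.ofList [cs.getD n ' '] ≠ l then out ++ [cs.getD n ' '] else out)

def rm_letter_rev_alt (l : String) (astr : String) : String :=
  String.ofList (rm_letter_rev_altLoop l astr.toList astr.toList.length [])

-- ===== PRECONDITION & SPEC =====
def Spec_rm_letter_rev (l : String) (astr : String) (out : String) : Prop := out = rm_letter_rev_alt l astr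
instance (l : String) (astr : String) (out : String) : Decidable (Spec_rm_letter_rev l astr out) := by unfold Spec_rm_letter_rev; infer_instance

-- ===== CLAIM (what is proved, stated in full; the proofs are below) =====
def Claim_equal_rm_letter_rev : Prop := ∀ (l : String) (astr : String), Dom_rm_letter_rev l astr → Spec_rm_letter_rev l astr (rm_letter_rev l astr)

-- ===== LEMMAS AND PROOFS =====
theorem prepend_filter_foldl (p : Char → Prop) [DecidablePred p] (cs acc : List Char) :
    cs.foldl (fun frase c => if p c then c :: frase else frase) acc
      = (cs.filter (fun c => decide (p c))).reverse ++ acc := by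
  induction cs generalizing acc with
  | nil => simp
  | cons c cs ih =>
    simp only [List.foldl, List.filter]
    by_cases h : p c <;> simp [h, ih]

theorem altLoop_eq_filter_take (l : String) (cs : List Char) (n : Nat) (hn : n ≤ cs.length)
    (out : List Char) :
    rm_letter_rev_altLoop l cs n out
      = out ++ ((cs.take n).filter (fun c => decide (String.ofList [c] ≠ l))).reverse := by
  induction n generalizing out with
  | zero => simp [rm_letter_rev_altLoop]
  | succ n ih =>
    have hlt : n < cs.length := hn
    have htake : cs.take (n + 1) = cs.take n ++ [cs.getD n ' '] := by
      rw [List.take_add_one]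
      simp [List.getD_eq_getElem?_getD, List.getElem?_eq_getElem hlt]
    rw [rm_letter_rev_altLoop, ih (Nat.le_of_lt hlt), htake]
    generalize cs.getD n ' ' = d
    by_cases h : String.ofList [d] ≠ l <;>
      simp [h, List.filter_append, List.append_assoc]

-- ===== VERDICT (by name: the statement is the Claim_ definition above) =====
theorem rm_letter_rev_spec : Claim_equal_rm_letter_rev := by
  intro l astr _
  unfold Spec_rm_letter_rev rm_letter_rev rm_letter_rev_alt
  rw [prepend_filter_foldl, altLoop_eq_filter_take l astr.toList astr.toList.length le_rfl,
    List.take_length]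
  simp
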